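-- pv_equiv track=rewrite | github.com/JunSL-dev/bounce_ball | main.py | checkWhere
-- ===== SOURCE A (Python) =====
-- def checkWhere(pos, centerX, centerY, width, height, cnt, offset):
--     fromX = centerX - (width // 2)
--     toX = centerX + (width // 2)
--     fromY = centerY - (height // 2)
--     toY = centerY + (height // 2)
--
--     x = pos[0]
--     y = pos[1]
--
--     where = -1
--
--     for i in range(cnt):
--         if fromX <= x <= toX and fromY <= y - offset*i <= toY:
--             where = i+1
--             break
--
--     return where
-- ===== SOURCE B (Python) =====
-- def checkWhere(pos, centerX, centerY, width, height, cnt, offset):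
--     # O(1): solve the linear inequalities for the smallest valid i directly.
--     x, y = pos[0], pos[1]
--     hw, hh = width // 2, height // 2
--     if cnt <= 0 or not (centerX - hw <= x <= centerX + hw):
--         return -1
--     if offset == 0:
--         return 1 if centerY - hh <= y <= centerY + hh else -1
--     # need centerY-hh <= y - offset*i <= centerY+hh, i.e. a <= offset*i <= b
--     a = y - (centerY + hh)
--     b = y - (centerY - hh)
--     if offset < 0:
--         a, b, d = -b, -a, -offset
--     else:
--         d = offset
--     lo = -((-a) // d)   # ceil(a/d)
--     hi = b // d         # floor(b/d)
--     i = lo if lo > 0 else 0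
--     return i + 1 if (i <= hi and i < cnt) else -1
-- ===== Notes on version B (the rewrite author's own statement) =====
-- stated objective: faster
-- what changed: Replaces the O(cnt) linear scan over candidate indices with an O(1) closed form that solves the two linear inequalities for the smallest valid i by sign-cased ceiling/floor division.
import Mathlib
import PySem

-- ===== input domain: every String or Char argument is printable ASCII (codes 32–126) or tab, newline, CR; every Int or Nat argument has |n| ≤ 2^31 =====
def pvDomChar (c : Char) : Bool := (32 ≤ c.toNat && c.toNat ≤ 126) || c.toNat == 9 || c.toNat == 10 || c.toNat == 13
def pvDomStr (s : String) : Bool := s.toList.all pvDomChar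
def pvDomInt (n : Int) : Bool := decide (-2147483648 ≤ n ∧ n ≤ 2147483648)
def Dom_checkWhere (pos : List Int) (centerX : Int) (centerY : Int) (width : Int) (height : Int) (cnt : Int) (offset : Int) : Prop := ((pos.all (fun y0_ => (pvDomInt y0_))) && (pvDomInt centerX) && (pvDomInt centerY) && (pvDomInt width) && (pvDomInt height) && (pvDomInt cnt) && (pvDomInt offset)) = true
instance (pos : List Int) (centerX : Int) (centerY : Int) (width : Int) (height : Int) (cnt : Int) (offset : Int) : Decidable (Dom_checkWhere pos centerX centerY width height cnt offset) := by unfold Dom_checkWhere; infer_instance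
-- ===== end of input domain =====

-- B replaces A's O(cnt) scan by an O(1) closed form solving the inequalities for the smallest valid index.

-- ===== PORT A =====
-- the `for i in range(cnt): if …: where = i+1; break` loop, step for step
-- (fuel = number of remaining iterations, i = current loop index)
def checkWhereLoop (fromX toX fromY toY x y offset : Int) (i : Int) : Nat → Int
  | 0 => -1
  | n+1 =>
    if fromX ≤ x ∧ x ≤ toX ∧ fromY ≤ y - offset * i ∧ y - offset * i ≤ toY then
      i + 1
    else
      checkWhereLoop fromX toX fromY toY x y offset (i + 1) n

def checkWhere (pos : List Int) (centerX : Int) (centerY : Int) (width : Int) (height : Int) (cnt : Int) (offset : Int) : Int :=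
  let fromX := centerX - PySem.Int.floordiv width 2
  let toX := centerX + PySem.Int.floordiv width 2
  let fromY := centerY - PySem.Int.floordiv height 2
  let toY := centerY + PySem.Int.floordiv height 2
  let x := (PySem.List.pyGet? pos 0).getD 0   -- pos[0]; Pre_ guarantees it exists
  let y := (PySem.List.pyGet? pos 1).getD 0   -- pos[1]; Pre_ guarantees it exists
  checkWhereLoop fromX toX fromY toY x y offset 0 cnt.toNat

-- ===== PORT B =====
def checkWhere_alt (pos : List Int) (centerX : Int) (centerY : Int) (width : Int) (height : Int) (cnt : Int) (offset : Int) : Int :=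
  let x := (PySem.List.pyGet? pos 0).getD 0
  let y := (PySem.List.pyGet? pos 1).getD 0
  let hw := PySem.Int.floordiv width 2
  let hh := PySem.Int.floordiv height 2
  if cnt ≤ 0 ∨ ¬ (centerX - hw ≤ x ∧ x ≤ centerX + hw) then -1
  else if offset = 0 then
    if centerY - hh ≤ y ∧ y ≤ centerY + hh then 1 else -1
  else
    let a := y - (centerY + hh)
    let b := y - (centerY - hh)
    let abd : Int × Int × Int := if offset < 0 then (-b, -a, -offset) else (a, b, offset)
    let lo := -(PySem.Int.floordiv (-abd.1) abd.2.2)   -- ceil(a/d)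
    let hi := PySem.Int.floordiv abd.2.1 abd.2.2       -- floor(b/d)
    let i := if lo > 0 then lo else 0
    if i ≤ hi ∧ i < cnt then i + 1 else -1

-- ===== PRECONDITION & SPEC =====
-- A indexes pos[0] and pos[1]; Pre_ excludes lists shorter than 2, where A raises IndexError.
def Pre_checkWhere (pos : List Int) (centerX : Int) (centerY : Int) (width : Int) (height : Int) (cnt : Int) (offset : Int) : Prop := 2 ≤ pos.length
instance (pos : List Int) (centerX : Int) (centerY : Int) (width : Int) (height : Int) (cnt : Int) (offset : Int) : Decidable (Pre_checkWhere pos centerX centerY width height cnt offset) := by unfold Pre_checkWhere; infer_instance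

def pvWitness_checkWhere : List Int × Int × Int × Int × Int × Int × Int := ([3, 7], 2, 1, 4, 6, 5, 2)

def Spec_checkWhere (pos : List Int) (centerX : Int) (centerY : Int) (width : Int) (height : Int) (cnt : Int) (offset : Int) (out : Int) : Prop := out = checkWhere_alt pos centerX centerY width height cnt offset
instance (pos : List Int) (centerX : Int) (centerY : Int) (width : Int) (height : Int) (cnt : Int) (offset : Int) (out : Int) : Decidable (Spec_checkWhere pos centerX centerY width height cnt offset out) := by unfold Spec_checkWhere; infer_instance

-- ===== CLAIM (what is proved, stated in full; the proofs are below) =====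
def Claim_equal_checkWhere : Prop := ∀ (pos : List Int) (centerX : Int) (centerY : Int) (width : Int) (height : Int) (cnt : Int) (offset : Int), Dom_checkWhere pos centerX centerY width height cnt offset → Pre_checkWhere pos centerX centerY width height cnt offset → Spec_checkWhere pos centerX centerY width height cnt offset (checkWhere pos centerX centerY width height cnt offset)

-- ===== LEMMAS AND PROOFS =====

-- If the x-condition fails, the loop never fires.
theorem loop_noX (fromX toX fromY toY x y offset : Int)
    (hx : ¬ (fromX ≤ x ∧ x ≤ toX)) :
    ∀ (n : Nat) (i : Int), checkWhereLoop fromX toX fromY toY x y offset i n = -1 := by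
  intro n
  induction n with
  | zero => intro i; rfl
  | succ n ih =>
    intro i
    simp only [checkWhereLoop]
    rw [if_neg (by tauto)]
    exact ih (i + 1)

-- If the condition holds at every index, the loop fires on the first iteration.
theorem loop_always (fromX toX fromY toY x y offset : Int)
    (hx : fromX ≤ x ∧ x ≤ toX)
    (hy : ∀ i : Int, fromY ≤ y - offset * i ∧ y - offset * i ≤ toY) :
    ∀ (n : Nat) (i : Int), 0 < n → checkWhereLoop fromX toX fromY toY x y offset i n = i + 1 := by
  intro n i hn
  cases n with
  | zero => omega
  | succ n =>
    simp only [checkWhereLoop]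
    rw [if_pos ⟨hx.1, hx.2, (hy i).1, (hy i).2⟩]

-- Closed form for the loop when the y-condition is an interval [L, H] in i.
theorem loop_interval (fromX toX fromY toY x y offset L H : Int)
    (hx : fromX ≤ x ∧ x ≤ toX)
    (hiff : ∀ i : Int, (fromY ≤ y - offset * i ∧ y - offset * i ≤ toY) ↔ (L ≤ i ∧ i ≤ H)) :
    ∀ (n : Nat) (i : Int),
      checkWhereLoop fromX toX fromY toY x y offset i n =
        if max i L ≤ H ∧ max i L < i + n then max i L + 1 else -1 := by
  intro n
  induction n with
  | zero =>
    intro i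
    rw [if_neg (by omega)]
    rfl
  | succ n ih =>
    intro i
    simp only [checkWhereLoop]
    by_cases hP : L ≤ i ∧ i ≤ H
    · rw [if_pos ⟨hx.1, hx.2, ((hiff i).mpr hP).1, ((hiff i).mpr hP).2⟩,
        if_pos (by omega)]
      omega
    · rw [if_neg (by
        intro ⟨_, _, h1, h2⟩
        exact hP ((hiff i).mp ⟨h1, h2⟩)), ih (i + 1)]
      by_cases hiH : H < i
      · rw [if_neg (by omega), if_neg (by omega)]
      · -- here i < L (since ¬(L ≤ i ∧ i ≤ H) and i ≤ H), so max (i+1) L = max i L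
        have hiL : i < L := by omega
        have : max (i + 1) L = max i L := by omega
        rw [this]
        by_cases hc : max i L ≤ H ∧ max i L < i + 1 + n
        · rw [if_pos hc, if_pos (by push_cast; omega)]
        · rw [if_neg hc, if_neg (by push_cast at hc ⊢; omega)]

-- a ≤ b.floordiv c ↔ a*c ≤ b for 0 < c
theorem le_floordiv (a b c : Int) (hc : 0 < c) :
    a ≤ PySem.Int.floordiv b c ↔ a * c ≤ b := by
  rw [PySem.Int.floordiv_eq_ediv_of_pos hc]
  exact Int.le_ediv_iff_mul_le hc


-- If the full condition fails at every index, the loop never fires.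
theorem loop_never (fromX toX fromY toY x y offset : Int)
    (hy : ∀ i : Int, ¬ (fromX ≤ x ∧ x ≤ toX ∧ fromY ≤ y - offset * i ∧ y - offset * i ≤ toY)) :
    ∀ (n : Nat) (i : Int), checkWhereLoop fromX toX fromY toY x y offset i n = -1 := by
  intro n
  induction n with
  | zero => intro i; rfl
  | succ n ih =>
    intro i
    simp only [checkWhereLoop]
    rw [if_neg (hy i)]
    exact ih (i + 1)

-- the y-condition as an interval in i, positive multiplier
theorem interval_pos (lowY highY y d i : Int) (hd : 0 < d) :
    (lowY ≤ y - d * i ∧ y - d * i ≤ highY) ↔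
      (-(PySem.Int.floordiv (-(y - highY)) d) ≤ i ∧ i ≤ PySem.Int.floordiv (y - lowY) d) := by
  have h1 : -(PySem.Int.floordiv (-(y - highY)) d) ≤ i ↔ y - d * i ≤ highY := by
    rw [neg_le, le_floordiv _ _ _ hd]
    have e : -i * d = -(d * i) := by ring
    rw [e]
    constructor <;> intro <;> linarith
  have h2 : i ≤ PySem.Int.floordiv (y - lowY) d ↔ lowY ≤ y - d * i := by
    rw [le_floordiv _ _ _ hd]
    have e : i * d = d * i := by ring
    rw [e]
    constructor <;> intro <;> linarith
  rw [h1, h2]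
  tauto

-- the y-condition as an interval in i, negative multiplier (bounds mirrored as in B)
theorem interval_neg (lowY highY y d i : Int) (hd : d < 0) :
    (lowY ≤ y - d * i ∧ y - d * i ≤ highY) ↔
      (-(PySem.Int.floordiv (-(-(y - lowY))) (-d)) ≤ i ∧ i ≤ PySem.Int.floordiv (-(y - highY)) (-d)) := by
  have h1 : -(PySem.Int.floordiv (-(-(y - lowY))) (-d)) ≤ i ↔ lowY ≤ y - d * i := by
    rw [neg_le, le_floordiv _ _ _ (by omega)]
    have e : -i * -d = d * i := by ring
    rw [e]
    constructor <;> intro <;> linarith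
  have h2 : i ≤ PySem.Int.floordiv (-(y - highY)) (-d) ↔ y - d * i ≤ highY := by
    rw [le_floordiv _ _ _ (by omega)]
    have e : i * -d = -(d * i) := by ring
    rw [e]
    constructor <;> intro <;> linarith
  rw [h1, h2]

theorem checkWhere_spec : Claim_equal_checkWhere := by
  intro pos centerX centerY width height cnt offset _ hpre
  unfold Spec_checkWhere checkWhere checkWhere_alt
  simp only []
  set hw := PySem.Int.floordiv width 2 with hhw
  set hh := PySem.Int.floordiv height 2 with hhh
  set x := (PySem.List.pyGet? pos 0).getD 0 with hx
  set y := (PySem.List.pyGet? pos 1).getD 0 with hy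
  by_cases hcnt : cnt ≤ 0
  · rw [if_pos (Or.inl hcnt)]
    have h0 : cnt.toNat = 0 := by omega
    rw [h0]
    rfl
  · have hn : (cnt.toNat : Int) = cnt := by omega
    by_cases hxin : centerX - hw ≤ x ∧ x ≤ centerX + hw
    · rw [if_neg (by tauto)]
      by_cases hoff : offset = 0
      · rw [if_pos hoff]
        subst hoff
        by_cases hyin : centerY - hh ≤ y ∧ y ≤ centerY + hh
        · rw [if_pos hyin,
            loop_always _ _ _ _ _ _ _ hxin
              (fun i => by simpa using hyin) cnt.toNat 0 (by omega)]
          norm_num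
        · rw [if_neg hyin,
            loop_never _ _ _ _ _ _ _
              (fun i => by
                simp only [zero_mul, sub_zero]
                exact fun h => hyin ⟨h.2.2.1, h.2.2.2⟩)]
      · rw [if_neg hoff]
        by_cases hneg : offset < 0
        · rw [if_pos hneg]
          simp only
          rw [loop_interval _ _ _ _ _ _ _ _ _ hxin
            (fun i => interval_neg (centerY - hh) (centerY + hh) y offset i hneg) cnt.toNat 0]
          split_ifs <;> omega
        · have hpos : 0 < offset := by omega
          rw [if_neg hneg]
          simp only []
          rw [loop_interval _ _ _ _ _ _ _ _ _ hxin
            (fun i => interval_pos (centerY - hh) (centerY + hh) y offset i hpos) cnt.toNat 0]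
          split_ifs <;> omega
    · rw [if_pos (Or.inr hxin), loop_noX _ _ _ _ _ _ _ hxin]
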